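-- pv_equiv track=rewrite | github.com/diptangsu/Sorting-Algorithms | Python/StalinSort.py | stalin_sort
-- ===== SOURCE A (Python) =====
-- def stalin_sort(lis):
--     i = 0
--
--     #  While i is less than len of lis
--     while i < len(lis) - 1:
--
--         #  If element i is bigger than next element
--         #  Remove element i
--         #  and decrease i by one if i is not zero
--         if lis[i] > lis[i + 1]:
--
--             del lis[i]
--             if i != 0:
--                 i -= 1
--
--         # Else
--         # Add to i by one
--         else:    i += 1
--
--
--     return lis
-- ===== SOURCE B (Python) =====
-- def stalin_sort(lis):
--     # One right-to-left pass: keep elements <= the running minimum of the suffix.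
--     res = []
--     m = None
--     for x in reversed(lis):
--         if m is None or x <= m:
--             res.append(x)
--             m = x
--     res.reverse()
--     lis[:] = res
--     return lis
-- ===== Notes on version B (the rewrite author's own statement) =====
-- stated objective: faster
-- what changed: Replaced the quadratic delete-and-backtrack while loop over a mutating list by a single right-to-left pass that keeps exactly the elements not exceeding the running suffix minimum, then reverses.
import Mathlib
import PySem

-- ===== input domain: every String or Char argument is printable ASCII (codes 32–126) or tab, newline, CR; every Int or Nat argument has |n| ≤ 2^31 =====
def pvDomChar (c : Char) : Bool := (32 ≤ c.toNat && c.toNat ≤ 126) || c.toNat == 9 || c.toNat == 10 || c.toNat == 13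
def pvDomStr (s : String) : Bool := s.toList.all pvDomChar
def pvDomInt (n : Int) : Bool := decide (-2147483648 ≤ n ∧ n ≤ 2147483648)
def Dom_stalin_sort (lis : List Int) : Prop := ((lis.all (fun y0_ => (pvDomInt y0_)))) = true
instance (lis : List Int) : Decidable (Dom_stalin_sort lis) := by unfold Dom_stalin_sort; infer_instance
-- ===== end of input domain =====

-- B is a linear one-pass re-implementation; A also mutates its argument in place and B mirrors that
-- mutation (lis[:] = res), so return value and side effect agree.

-- ===== PORT A =====
-- A's while loop: delete lis[i] when lis[i] > lis[i+1] and step back, else advance.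
-- fuel only totalizes the loop (each iteration strictly decreases 2*len-i, so 2*len+1 suffices);
-- it does not change the computation.
def stalin_sortLoop (fuel : Nat) (lis : List Int) (i : Nat) : List Int :=
  match fuel with
  | 0 => lis
  | fuel + 1 =>
    if h : i + 1 < lis.length then
      if lis[i]'(by omega) > lis[i + 1]'h then
        stalin_sortLoop fuel (lis.eraseIdx i) (if i ≠ 0 then i - 1 else i)
      else
        stalin_sortLoop fuel lis (i + 1)
    else lis

def stalin_sort (lis : List Int) : List Int := stalin_sortLoop (2 * lis.length + 1) lis 0

-- ===== PORT B =====
-- one left-to-right pass over the reversed list, keeping x when x ≤ running minimum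
def stalin_sortAltStep (acc : List Int × Option Int) (x : Int) : List Int × Option Int :=
  match acc.2 with
  | none => (acc.1 ++ [x], some x)
  | some m => if x ≤ m then (acc.1 ++ [x], some x) else acc

def stalin_sort_alt (lis : List Int) : List Int :=
  ((lis.reverse.foldl stalin_sortAltStep ([], none)).1).reverse

-- ===== PRECONDITION & SPEC =====
def Spec_stalin_sort (lis : List Int) (out : List Int) : Prop := out = stalin_sort_alt lis
instance (lis : List Int) (out : List Int) : Decidable (Spec_stalin_sort lis out) := by unfold Spec_stalin_sort; infer_instance

-- ===== CLAIM (what is proved, stated in full; the proofs are below) =====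
def Claim_equal_stalin_sort : Prop := ∀ (lis : List Int), Dom_stalin_sort lis → Spec_stalin_sort lis (stalin_sort lis)

-- ===== LEMMAS AND PROOFS =====

-- structural right-fold characterisation both ports are reduced to
def gstep (x : Int) (r : List Int) : List Int :=
  match r with
  | [] => [x]
  | y :: _ => if x ≤ y then x :: r else r

def gfun (l : List Int) : List Int := l.foldr gstep []

theorem gfun_head_min (s : List Int) (hs : s ≠ []) :
    ∃ h t, gfun s = h :: t ∧ ∀ x ∈ s, h ≤ x := by
  induction s with
  | nil => exact absurd rfl hs
  | cons a s ih =>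
    by_cases hs' : s = []
    · subst hs'
      exact ⟨a, [], rfl, by simp⟩
    · obtain ⟨h, t, hg, hmin⟩ := ih hs'
      show ∃ h' t', gstep a (gfun s) = h' :: t' ∧ _
      rw [hg]
      by_cases hle : a ≤ h
      · exact ⟨a, h :: t, by simp [gstep, hle], by
          intro x hx
          rcases List.mem_cons.1 hx with rfl | hx
          · exact le_refl x
          · exact le_trans hle (hmin x hx)⟩
      · exact ⟨h, t, by simp [gstep, hle], by
          intro x hx
          rcases List.mem_cons.1 hx with rfl | hx
          · omega
          · exact hmin x hx⟩

theorem gfun_sorted_id (l : List Int) (hl : l.Pairwise (· ≤ ·)) : gfun l = l := by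
  induction l with
  | nil => rfl
  | cons a l ih =>
    have hl' : l.Pairwise (· ≤ ·) := (List.pairwise_cons.1 hl).2
    have := ih hl'
    show gstep a (gfun l) = a :: l
    rw [this]
    cases l with
    | nil => rfl
    | cons b t =>
      have hab : a ≤ b := (List.pairwise_cons.1 hl).1 b (by simp)
      simp [gstep, hab]

theorem pairwise_take_one (l : List Int) : (l.take 1).Pairwise (· ≤ ·) := by
  cases l <;> simp

-- A's loop computes foldr gstep over the (sorted) prefix with gfun of the suffix as seed
theorem loopA_char (fuel : Nat) : ∀ (lis : List Int) (i : Nat),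
    (lis.take (i + 1)).Pairwise (· ≤ ·) → 2 * lis.length - i < fuel →
    stalin_sortLoop fuel lis i = (lis.take (i + 1)).foldr gstep (gfun (lis.drop (i + 1))) := by
  induction fuel with
  | zero => intro lis i _ hf; omega
  | succ fuel ih =>
    intro lis i hp hf
    rw [stalin_sortLoop]
    by_cases h : i + 1 < lis.length
    · rw [dif_pos h]
      by_cases hgt : lis[i]'(by omega) > lis[i + 1]'h
      · -- delete branch: lis[i] > lis[i+1]
        rw [if_pos hgt]
        have hi1 : i < lis.length := by omega
        have herase : lis.eraseIdx i = lis.take i ++ lis.drop (i + 1) :=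
          List.eraseIdx_eq_take_drop_succ lis i
        have hlenerase : (lis.eraseIdx i).length = lis.length - 1 :=
          List.length_eraseIdx_of_lt hi1
        have hdropne : lis.drop (i + 1) ≠ [] := by
          intro hcon
          have := congrArg List.length hcon
          simp at this
          omega
        obtain ⟨hd, tl, hg, hmin⟩ := gfun_head_min _ hdropne
        have hdropcons : lis.drop (i + 1) = lis[i + 1] :: lis.drop (i + 2) :=
          List.drop_eq_getElem_cons h
        have hhd : hd ≤ lis[i + 1]'h := by
          apply hmin
          rw [hdropcons]
          exact List.mem_cons_self ..
        -- gstep drops lis[i]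
        have hstep : gstep (lis[i]'hi1) (gfun (lis.drop (i + 1))) = gfun (lis.drop (i + 1)) := by
          rw [hg]
          simp only [gstep]
          rw [if_neg (by omega)]
        have htakesucc : lis.take (i + 1) = lis.take i ++ [lis[i]'hi1] := by
          rw [List.take_add_one]
          simp [List.getElem?_eq_getElem hi1]
        by_cases hi0 : i ≠ 0
        · rw [if_pos hi0]
          have hii : i - 1 + 1 = i := by omega
          have hlent : i ≤ (lis.take i).length := by simp; omega
          have htake' : (lis.eraseIdx i).take (i - 1 + 1) = lis.take i := by
            rw [herase, hii, List.take_append_of_le_length hlent, List.take_take]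
            congr 1
            omega
          have hdrop' : (lis.eraseIdx i).drop (i - 1 + 1) = lis.drop (i + 1) := by
            rw [herase, hii, List.drop_append_of_le_length hlent,
              List.drop_eq_nil_of_le (by simp), List.nil_append]
          have hpre : ((lis.eraseIdx i).take (i - 1 + 1)).Pairwise (· ≤ ·) := by
            rw [htake']
            have : lis.take i = (lis.take (i + 1)).take i := by
              rw [List.take_take]; congr 1; omega
            rw [this]
            exact hp.sublist (List.take_sublist _ _)
          rw [ih _ _ hpre (by omega), htake', hdrop', htakesucc, List.foldr_append]
          simp only [List.foldr_cons, List.foldr_nil]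
          rw [hstep]
        · have hi0' : i = 0 := by omega
          subst hi0'
          rw [if_neg (by omega)]
          have htake1 : (lis.eraseIdx 0).take 1 = (lis.drop 1).take 1 := by
            rw [herase]; simp
          have hdrop1 : (lis.eraseIdx 0).drop 1 = (lis.drop 1).drop 1 := by
            rw [herase]; simp
          have hpre : ((lis.eraseIdx 0).take 1).Pairwise (· ≤ ·) := pairwise_take_one _
          rw [ih _ _ hpre (by omega), htake1, hdrop1]
          have hfold : gfun (lis.drop 1)
              = ((lis.drop 1).take 1).foldr gstep (gfun ((lis.drop 1).drop 1)) := by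
            conv_lhs => rw [show gfun (lis.drop 1) = (lis.drop 1).foldr gstep [] from rfl,
              ← List.take_append_drop 1 (lis.drop 1), List.foldr_append]
            rfl
          have h0 : lis.take 1 = [lis[0]'(by omega)] := by
            cases lis with
            | nil => simp at h
            | cons a t => simp
          rw [h0]
          simp only [List.foldr_cons, List.foldr_nil]
          rw [hstep]
          exact hfold.symm
      · -- advance branch: lis[i] ≤ lis[i+1]
        rw [if_neg hgt]
        have hi1 : i < lis.length := by omega
        have htakesucc : lis.take (i + 2) = lis.take (i + 1) ++ [lis[i + 1]'h] := by
          rw [List.take_add_one]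
          simp [List.getElem?_eq_getElem h]
        have hp' : (lis.take (i + 2)).Pairwise (· ≤ ·) := by
          rw [htakesucc, List.pairwise_append]
          refine ⟨hp, by simp, ?_⟩
          intro a ha b hb
          simp at hb
          subst hb
          -- every element of take (i+1) is ≤ lis[i], and lis[i] ≤ lis[i+1]
          have htakei : lis.take (i + 1) = lis.take i ++ [lis[i]'hi1] := by
            rw [List.take_add_one]
            simp [List.getElem?_eq_getElem hi1]
          rw [htakei] at ha hp
          rcases List.mem_append.1 ha with ha' | ha'
          · rw [List.pairwise_append] at hp
            have := hp.2.2 a ha' (lis[i]'hi1) (by simp)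
            omega
          · simp at ha'
            subst ha'
            omega
        rw [ih _ _ hp' (by omega), htakesucc, List.foldr_append]
        have hdropcons : lis.drop (i + 1) = lis[i + 1] :: lis.drop (i + 2) :=
          List.drop_eq_getElem_cons h
        rw [hdropcons]
        rfl
    · rw [dif_neg h]
      have hlen : lis.length ≤ i + 1 := by omega
      rw [List.take_of_length_le hlen, List.drop_eq_nil_of_le hlen]
      show lis = lis.foldr gstep (gfun [])
      rw [List.take_of_length_le hlen] at hp
      exact (gfun_sorted_id lis hp).symm

theorem stalin_sort_eq_gfun (lis : List Int) : stalin_sort lis = gfun lis := by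
  unfold stalin_sort
  rw [loopA_char (2 * lis.length + 1) lis 0 (pairwise_take_one lis) (by omega)]
  conv_rhs => rw [show gfun lis = lis.foldr gstep [] from rfl,
    ← List.take_append_drop 1 lis, List.foldr_append]
  rfl

-- B's reverse-fold state is (reverse of gfun of the processed suffix, its head)
theorem altFold_char (s : List Int) :
    s.reverse.foldl stalin_sortAltStep ([], none) = ((gfun s).reverse, (gfun s).head?) := by
  induction s with
  | nil => rfl
  | cons a s ih =>
    rw [List.reverse_cons, List.foldl_append, ih]
    simp only [List.foldl_cons, List.foldl_nil]
    show stalin_sortAltStep ((gfun s).reverse, (gfun s).head?) a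
        = ((gstep a (gfun s)).reverse, (gstep a (gfun s)).head?)
    cases hg : gfun s with
    | nil => simp [stalin_sortAltStep, gstep]
    | cons y t =>
      by_cases hle : a ≤ y
      · simp [stalin_sortAltStep, gstep, hle]
      · simp [stalin_sortAltStep, gstep, hle]

theorem stalin_sort_alt_eq_gfun (lis : List Int) : stalin_sort_alt lis = gfun lis := by
  unfold stalin_sort_alt
  rw [altFold_char]
  simp

-- ===== VERDICT (by name: the statement is the Claim_ definition above) =====
theorem stalin_sort_spec : Claim_equal_stalin_sort := by
  intro lis _
  show stalin_sort lis = stalin_sort_alt lis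
  rw [stalin_sort_eq_gfun, stalin_sort_alt_eq_gfun]
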